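-- pv_equiv track=rewrite | github.com/ColinFendrick/CodeWarsSolutions | finite-state-machine.py | read_commands
-- ===== SOURCE A (Python) =====
-- def read_commands(commands):
--     state = 1
--     for a in commands:
--         if state == 1:
--             if a == "1":
--                 state = 2
--         elif state == 2:
--             if a == "0":
--                 state = 3
--         else:
--             state = 2
--
--     return state == 2
-- ===== SOURCE B (Python) =====
-- def read_commands(commands):
--     # True iff some '1' was seen and the run of trailing '0's has even length
--     return '1' in commands and (len(commands) - len(commands.rstrip('0'))) % 2 == 0
-- ===== Notes on version B (the rewrite author's own statement) =====
-- stated objective: simpler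
-- what changed: Replaces the per-character three-state machine loop with a single closed-form expression: the result is True iff the string contains a '1' and the trailing run of '0' characters has even length.
import Mathlib
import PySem

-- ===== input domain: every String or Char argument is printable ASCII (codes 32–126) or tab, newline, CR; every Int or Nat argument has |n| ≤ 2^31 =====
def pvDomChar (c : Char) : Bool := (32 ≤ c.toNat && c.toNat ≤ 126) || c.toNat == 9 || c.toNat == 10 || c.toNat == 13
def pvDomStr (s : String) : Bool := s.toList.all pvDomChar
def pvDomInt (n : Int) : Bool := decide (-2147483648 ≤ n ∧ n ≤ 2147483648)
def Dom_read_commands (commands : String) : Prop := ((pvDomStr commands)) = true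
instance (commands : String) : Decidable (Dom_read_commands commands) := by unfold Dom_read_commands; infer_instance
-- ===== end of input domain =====

-- B replaces A's per-character three-state loop by a closed-form test ('1' present and
-- trailing-'0' run of even length); objective: simpler.


-- ===== PORT A =====
-- the loop body of A: the state transition for one character
def rcStep (state : Int) (a : Char) : Int :=
  if state = 1 then (if a = '1' then 2 else state)
  else if state = 2 then (if a = '0' then 3 else state)
  else 2

def read_commands (commands : String) : Bool :=
  (commands.toList.foldl rcStep 1) == 2

-- ===== PORT B =====
-- hand port of commands.rstrip('0') (exact: drops exactly the trailing '0' characters)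
def rcRstrip0 (cs : List Char) : List Char :=
  ((cs.reverse.dropWhile (· == '0')).reverse)

def read_commands_alt (commands : String) : Bool :=
  PySem.Str.isIn "1" commands
    && (commands.toList.length - (rcRstrip0 commands.toList).length) % 2 == 0

-- ===== PRECONDITION & SPEC =====
def Spec_read_commands (commands : String) (out : Bool) : Prop := out = read_commands_alt commands
instance (commands : String) (out : Bool) : Decidable (Spec_read_commands commands out) := by unfold Spec_read_commands; infer_instance

-- ===== CLAIM (what is proved, stated in full; the proofs are below) =====
def Claim_equal_read_commands : Prop := ∀ (commands : String), Dom_read_commands commands → Spec_read_commands commands (read_commands commands)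

-- ===== LEMMAS AND PROOFS =====

-- number of trailing '0' characters
def rcTrail (cs : List Char) : Nat := (cs.reverse.takeWhile (· == '0')).length

theorem rcTrail_append (cs : List Char) (c : Char) :
    rcTrail (cs ++ [c]) = if c = '0' then rcTrail cs + 1 else 0 := by
  by_cases h : c = '0' <;>
    simp [rcTrail, h]

theorem rcRstrip0_len (cs : List Char) :
    cs.length - (rcRstrip0 cs).length = rcTrail cs := by
  simp [rcRstrip0, rcTrail]
  have h := List.takeWhile_append_dropWhile (p := (· == '0')) (l := cs.reverse)
  have h2 : (List.takeWhile (· == '0') cs.reverse).length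
       + (List.dropWhile (· == '0') cs.reverse).length = cs.reverse.length := by
    rw [← List.length_append, h]
  rw [List.length_reverse] at h2
  omega

-- characterisation of A's loop state
theorem rcFold_char (cs : List Char) :
    cs.foldl rcStep 1 =
      if '1' ∈ cs then (if rcTrail cs % 2 = 1 then 3 else 2) else 1 := by
  induction cs using List.reverseRecOn with
  | nil => simp
  | append_singleton l c ih =>
    rw [List.foldl_append, List.foldl_cons, List.foldl_nil, ih, rcTrail_append]
    by_cases h1 : '1' ∈ l
    · simp only [h1, if_true]
      by_cases hc : c = '0'
      · have : c ≠ '1' := by simp [hc]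
        by_cases hp : rcTrail l % 2 = 1
        · simp [hp, hc, rcStep, h1, List.mem_append]
          omega
        · simp [hp, hc, rcStep, h1, List.mem_append]
          omega
      · by_cases hp : rcTrail l % 2 = 1
        · simp [hp, hc, rcStep, h1, List.mem_append]
        · simp [hp, hc, rcStep, h1, List.mem_append]
    · simp only [h1, if_false]
      by_cases hc1 : c = '1'
      · have hc0 : c ≠ '0' := by simp [hc1]
        simp [rcStep, hc1, h1, List.mem_append]
      · have hc1' : ¬ ('1' = c) := fun h => hc1 h.symm
        by_cases hc0 : c = '0'
        · simp [rcStep, hc0, h1, List.mem_append]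
        · simp [rcStep, hc1, h1, hc1', List.mem_append]

theorem rcIsIn_one (cs : List Char) :
    PySem.Chars.isIn ['1'] cs = true ↔ '1' ∈ cs := by
  rw [PySem.Chars.isIn_iff_infix]
  constructor
  · intro h; exact h.mem (by simp)
  · intro h
    obtain ⟨l1, l2, h⟩ := List.append_of_mem h
    exact ⟨l1, l2, by simp [h]⟩

-- ===== VERDICT (by name: the statement is the Claim_ definition above) =====
theorem read_commands_spec : Claim_equal_read_commands := by
  intro s _
  unfold Spec_read_commands read_commands read_commands_alt
  rw [rcFold_char, rcRstrip0_len, PySem.Str.isIn_eq]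
  by_cases h1 : '1' ∈ s.toList
  · have hin : PySem.Chars.isIn ['1'] s.toList = true := (rcIsIn_one _).mpr h1
    by_cases hp : rcTrail s.toList % 2 = 1
    · simp [h1, hp, hin]
    · have hp' : rcTrail s.toList % 2 = 0 := by omega
      simp [h1, hp', hin]
  · have hin : PySem.Chars.isIn ['1'] s.toList = false := by
      rcases hhh : PySem.Chars.isIn ['1'] s.toList with _ | _
      · rfl
      · exact absurd ((rcIsIn_one _).mp hhh) h1
    simp [h1, hin]
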